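-- pv_equiv track=rewrite | github.com/shengyenlin/Introduction-of-information-retrieval-and-text-mining-Fall-2020 | hw2/pa2.py | get_df
-- ===== SOURCE A (Python) =====
-- def get_df(bag_of_words, raw_text):
--     '''
--     generate document frequency in a list
--     the order of the words is unchanged
--     '''
--     df = []
--     for word_find in bag_of_words:
--         count = 0
--         for news in raw_text:
--             for word_news in news:
--                 if (word_find == word_news):
--                     count += 1
--                     break
--         df.append(count)
--     return df
-- ===== SOURCE B (Python) =====
-- def get_df(bag_of_words, raw_text):
--     '''
--     generate document frequency in a list
--     the order of the words is unchanged
--     '''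
--     counts = {}
--     for news in raw_text:
--         for word in dict.fromkeys(news):
--             counts[word] = counts.get(word, 0) + 1
--     return [counts.get(word, 0) for word in bag_of_words]
-- ===== Notes on version B (the rewrite author's own statement) =====
-- stated objective: faster
-- what changed: Instead of scanning all documents for every bag word, B makes one pass over the documents, deduplicates each document's tokens and accumulates per-word document counts in a dict, then reads the counts off in bag order.
import Mathlib
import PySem

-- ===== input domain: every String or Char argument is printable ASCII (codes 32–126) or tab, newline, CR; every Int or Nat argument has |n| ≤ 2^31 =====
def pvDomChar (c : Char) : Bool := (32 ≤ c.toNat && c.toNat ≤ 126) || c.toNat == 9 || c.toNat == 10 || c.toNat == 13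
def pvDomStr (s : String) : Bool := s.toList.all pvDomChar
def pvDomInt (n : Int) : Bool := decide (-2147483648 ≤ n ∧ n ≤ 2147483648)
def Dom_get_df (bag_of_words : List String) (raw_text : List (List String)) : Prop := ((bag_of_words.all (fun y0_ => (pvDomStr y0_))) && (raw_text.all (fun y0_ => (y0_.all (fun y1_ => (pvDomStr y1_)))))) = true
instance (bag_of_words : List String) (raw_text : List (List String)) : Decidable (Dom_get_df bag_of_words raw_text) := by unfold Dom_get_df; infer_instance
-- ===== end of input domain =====

-- B replaces A's per-word scan of all documents by one pass over the documents
-- accumulating per-word document counts in a dict (objective: faster).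

-- ===== PORT A =====
-- inner 'for word_news in news: if word_find == word_news: count += 1; break'
def pvInnerA (word_find : String) (count : Int) : List String → Int
  | [] => count
  | w :: ws => if word_find == w then count + 1 else pvInnerA word_find count ws

def get_df (bag_of_words : List String) (raw_text : List (List String)) : List Int :=
  bag_of_words.foldl
    (fun df word_find =>
      df ++ [raw_text.foldl (fun count news => pvInnerA word_find count news) 0])
    []

-- ===== PORT B =====
def get_df_alt (bag_of_words : List String) (raw_text : List (List String)) : List Int :=
  let counts : PySem.Dict String Int :=
    raw_text.foldl
      (fun d news => (PySem.List.dedup news).foldl (fun d word => d.modify word 0 (· + 1)) d)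
      PySem.Dict.empty
  bag_of_words.map (fun word => counts.getD word 0)

-- ===== PRECONDITION & SPEC =====
def Spec_get_df (bag_of_words : List String) (raw_text : List (List String)) (out : List Int) : Prop := out = get_df_alt bag_of_words raw_text
instance (bag_of_words : List String) (raw_text : List (List String)) (out : List Int) : Decidable (Spec_get_df bag_of_words raw_text out) := by unfold Spec_get_df; infer_instance

-- ===== CLAIM (what is proved, stated in full; the proofs are below) =====
def Claim_equal_get_df : Prop := ∀ (bag_of_words : List String) (raw_text : List (List String)), Dom_get_df bag_of_words raw_text → Spec_get_df bag_of_words raw_text (get_df bag_of_words raw_text)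

-- ===== LEMMAS AND PROOFS =====

-- A's inner broken loop adds exactly the membership indicator.
theorem pvInnerA_eq (w : String) (c : Int) (news : List String) :
    pvInnerA w c news = c + (if w ∈ news then 1 else 0) := by
  induction news with
  | nil => simp [pvInnerA]
  | cons x xs ih =>
    by_cases h : w = x
    · simp [pvInnerA, h]
    · simp [pvInnerA, h, ih]

-- A's count for one word is the number of documents containing it.
theorem pvA_count (w : String) (c : Int) (raw : List (List String)) :
    raw.foldl (fun count news => pvInnerA w count news) c
      = c + (raw.map (fun news => if w ∈ news then (1 : Int) else 0)).sum := by
  have h : (fun count news => pvInnerA w count news)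
      = (fun (count : Int) news => count + if w ∈ news then 1 else 0) :=
    funext fun c => funext fun n => pvInnerA_eq w c n
  rw [h, PySem.List.foldl_add]

-- The count a nodup list holds of an element is its membership indicator.
theorem pvCount_dedup (w : String) (news : List String) :
    ((PySem.List.dedup news).count w : Int) = (if w ∈ news then 1 else 0) := by
  by_cases h : w ∈ news
  · rw [List.count_eq_one_of_mem (PySem.List.nodup_dedup news) ((PySem.List.mem_dedup news w).2 h)]
    simp [h]
  · rw [List.count_eq_zero_of_not_mem (fun hm => h ((PySem.List.mem_dedup news w).1 hm))]
    simp [h]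

-- B's dict after the pass holds, for every word, the document count.
theorem pvB_counts (raw : List (List String)) (d : PySem.Dict String Int) (w : String) :
    (raw.foldl
      (fun d news => (PySem.List.dedup news).foldl (fun d word => d.modify word 0 (· + 1)) d)
      d).getD w 0
      = d.getD w 0 + (raw.map (fun news => if w ∈ news then (1 : Int) else 0)).sum := by
  induction raw generalizing d with
  | nil => simp
  | cons n ns ih =>
    simp only [List.foldl_cons, List.map_cons, List.sum_cons]
    rw [ih, PySem.Dict.getD_foldl_modify_add_one, pvCount_dedup]
    ring

-- ===== VERDICT (by name: the statement is the Claim_ definition above) =====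
theorem get_df_spec : Claim_equal_get_df := by
  intro bag raw _
  unfold Spec_get_df get_df get_df_alt
  rw [PySem.List.foldl_append_singleton_eq_map]
  simp only [List.nil_append]
  apply List.map_congr_left
  intro w _
  rw [pvA_count, pvB_counts]
  simp
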